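-- pv_equiv track=rewrite | github.com/paule32/xmlDoxyGen | src/test1/scripts/convert_xml_to_html_fragments.py | _clean_doc_text
-- ===== SOURCE A (Python) =====
-- def _clean_doc_text(value: str) -> str:
--     if not value:
--         return ""
--     lines = [line.rstrip() for line in value.splitlines()]
--     while lines and not lines[0].strip():
--         lines.pop(0)
--     while lines and not lines[-1].strip():
--         lines.pop()
--     return "\n".join(lines)
-- ===== SOURCE B (Python) =====
-- def _clean_doc_text(value: str) -> str:
--     lines = [line.rstrip() for line in value.splitlines()]
--     content = [i for i, l in enumerate(lines) if l]
--     if not content: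
--         return ""
--     return "\n".join(lines[content[0]:content[-1] + 1])
-- ===== Notes on version B (the rewrite author's own statement) =====
-- stated objective: simpler
-- what changed: Replaced the two edge-popping while loops with one enumerate pass that collects the indices of non-blank lines and a single slice between the first and last such index.
import Mathlib
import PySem

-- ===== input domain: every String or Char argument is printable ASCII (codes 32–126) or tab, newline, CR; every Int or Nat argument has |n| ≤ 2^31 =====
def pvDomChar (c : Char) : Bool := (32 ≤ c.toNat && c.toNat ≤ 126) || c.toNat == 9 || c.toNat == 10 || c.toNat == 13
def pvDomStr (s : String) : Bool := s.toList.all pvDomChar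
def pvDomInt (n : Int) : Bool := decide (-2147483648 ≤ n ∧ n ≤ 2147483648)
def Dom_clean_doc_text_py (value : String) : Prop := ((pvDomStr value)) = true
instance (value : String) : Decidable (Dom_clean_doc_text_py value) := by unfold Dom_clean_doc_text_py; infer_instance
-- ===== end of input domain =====

-- B replaces A's two edge-popping while loops by one enumerate pass that collects the
-- indices of non-blank lines and a single slice between the first and last such index (simpler).

-- ===== PORT A =====
-- while lines and not lines[0].strip(): lines.pop(0)
def aTrimFront : List String → List String
  | [] => []
  | l :: ls => if PySem.Str.strip l == "" then aTrimFront ls else l :: ls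

-- while lines and not lines[-1].strip(): lines.pop()   (structural recursion from the tail)
def aTrimBack : List String → List String
  | [] => []
  | l :: ls =>
    match aTrimBack ls with
    | [] => if PySem.Str.strip l == "" then [] else [l]
    | r :: rs => l :: r :: rs

def clean_doc_text_py (value : String) : String :=
  if value == "" then ""
  else
    let lines := (PySem.Str.splitlines value).map PySem.Str.rstrip
    PySem.Str.join "\n" (aTrimBack (aTrimFront lines))

-- ===== PORT B =====
def clean_doc_text_py_alt (value : String) : String :=
  let lines := (PySem.Str.splitlines value).map PySem.Str.rstrip
  let content := ((PySem.List.enumerate lines).filter (fun p => !(p.2 == ""))).map Prod.fst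
  match content with
  | [] => ""
  | i :: rest =>
      PySem.Str.join "\n"
        (PySem.List.slice lines (some i) (some ((i :: rest).getLast (List.cons_ne_nil i rest) + 1)))

-- ===== PRECONDITION & SPEC =====
def Spec_clean_doc_text_py (value : String) (out : String) : Prop := out = clean_doc_text_py_alt value
instance (value : String) (out : String) : Decidable (Spec_clean_doc_text_py value out) := by unfold Spec_clean_doc_text_py; infer_instance

-- ===== CLAIM (what is proved, stated in full; the proofs are below) =====
def Claim_equal_clean_doc_text_py : Prop := ∀ (value : String), Dom_clean_doc_text_py value → Spec_clean_doc_text_py value (clean_doc_text_py value)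

-- ===== LEMMAS AND PROOFS =====

-- the index list B builds ("content"), with a starting offset
def bIdx (ls : List String) (k : Int) : List Int :=
  ((PySem.List.enumerate ls k).filter (fun p => !(p.2 == ""))).map Prod.fst

theorem bIdx_nil (k : Int) : bIdx [] k = [] := rfl

theorem bIdx_cons (l : String) (ls : List String) (k : Int) :
    bIdx (l :: ls) k = if l == "" then bIdx ls (k + 1) else k :: bIdx ls (k + 1) := by
  by_cases h : l = "" <;> simp [bIdx, PySem.List.enumerate, h]

theorem bIdx_shift (ls : List String) (k : Int) :
    bIdx ls (k + 1) = (bIdx ls k).map (· + 1) := by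
  induction ls generalizing k with
  | nil => rfl
  | cons l ls ih =>
      rw [bIdx_cons, bIdx_cons]
      by_cases h : (l == "") = true <;> simp [h, ih]

theorem bIdx_bounds (ls : List String) (k : Int) :
    ∀ i ∈ bIdx ls k, k ≤ i ∧ i < k + ls.length := by
  induction ls generalizing k with
  | nil => simp [bIdx_nil]
  | cons l ls ih =>
      intro i hi
      rw [bIdx_cons] at hi
      simp only [List.length_cons]
      by_cases h : (l == "") = true
      · rw [if_pos h] at hi
        have := ih (k + 1) i hi
        omega
      · rw [if_neg h] at hi
        rcases List.mem_cons.mp hi with rfl | hi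
        · omega
        · have := ih (k + 1) i hi
          omega

-- rstrip is empty exactly when the whole string is whitespace
theorem chars_rstrip_eq_nil_iff (cs : List Char) :
    PySem.Chars.rstrip cs = [] ↔ ∀ c ∈ cs, PySem.Chars.isspace c = true := by
  simp [PySem.Chars.rstrip, List.reverse_eq_nil_iff, List.dropWhile_eq_nil_iff]

theorem chars_strip_rstrip_nil_iff (cs : List Char) :
    PySem.Chars.strip (PySem.Chars.rstrip cs) = [] ↔ PySem.Chars.rstrip cs = [] := by
  constructor
  · intro h
    -- from strip z = [] conclude every char of z is a space, hence every char of cs is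
    have hall : ∀ c ∈ PySem.Chars.rstrip cs, PySem.Chars.isspace c = true := by
      intro c hc
      have h' : ∀ c ∈ PySem.Chars.lstrip (PySem.Chars.rstrip cs), PySem.Chars.isspace c = true :=
        (chars_rstrip_eq_nil_iff _).mp h
      have hsplit := List.takeWhile_append_dropWhile
        (p := PySem.Chars.isspace) (l := PySem.Chars.rstrip cs)
      rw [← hsplit] at hc
      rcases List.mem_append.mp hc with hc | hc
      · exact List.mem_takeWhile_imp hc
      · exact h' c hc
    refine (chars_rstrip_eq_nil_iff cs).mpr ?_
    intro c hc
    have hsplit := List.takeWhile_append_dropWhile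
      (p := PySem.Chars.isspace) (l := cs.reverse)
    have hcs : cs = (List.dropWhile PySem.Chars.isspace cs.reverse).reverse
        ++ (List.takeWhile PySem.Chars.isspace cs.reverse).reverse := by
      conv_lhs => rw [← List.reverse_reverse cs, ← hsplit]
      rw [List.reverse_append]
    rw [hcs] at hc
    rcases List.mem_append.mp hc with hc | hc
    · exact hall c (by simpa [PySem.Chars.rstrip] using hc)
    · exact List.mem_takeWhile_imp (List.mem_reverse.mp hc)
  · intro h; rw [h]; rfl

theorem strip_test_eq (s : String) :
    (PySem.Str.strip (PySem.Str.rstrip s) == "") = (PySem.Str.rstrip s == "") := by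
  rw [Bool.beq_eq_decide_eq, Bool.beq_eq_decide_eq]
  simp only [decide_eq_decide]
  rw [← String.toList_eq_nil_iff, ← String.toList_eq_nil_iff]
  simp only [PySem.Str.toList_strip, PySem.Str.toList_rstrip]
  exact chars_strip_rstrip_nil_iff s.toList

-- A's back loop keeps exactly the prefix up to the last non-blank line
theorem aTrimBack_eq (ls : List String)
    (hall : ∀ l ∈ ls, (PySem.Str.strip l == "") = (l == "")) :
    aTrimBack ls = match (bIdx ls 0).getLast? with
      | none => []
      | some J => List.take (J.toNat + 1) ls := by
  induction ls with
  | nil => rfl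
  | cons l ls ih =>
      have h := hall l (by simp)
      have ih' := ih fun x hx => hall x (by simp [hx])
      have hshift := bIdx_shift ls 0
      rcases h0 : (bIdx ls 0).getLast? with _ | J
      · have hnil : bIdx ls 0 = [] := List.getLast?_eq_none_iff.mp h0
        have hzero : aTrimBack ls = [] := by rw [ih', h0]
        have hshift1 : bIdx ls 1 = (bIdx ls 0).map (· + 1) := by
          simpa using bIdx_shift ls 0
        by_cases hb : (l == "") = true <;>
          simp [aTrimBack, h, hb, hzero, bIdx_cons, hshift1, hnil]
      · have hne : bIdx ls 0 ≠ [] := by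
          intro hc; rw [hc] at h0; simp at h0
        have hJ : 0 ≤ J := (bIdx_bounds ls 0 J (List.mem_of_getLast? h0)).1
        have hlsne : ls ≠ [] := by
          intro hc; subst hc; exact hne (bIdx_nil 0)
        have htake : List.take (J.toNat + 1) ls ≠ [] := by
          cases ls with
          | nil => exact absurd rfl hlsne
          | cons a as => simp [List.take]
        have hlast : (bIdx (l :: ls) 0).getLast? = some (J + 1) := by
          rw [bIdx_cons, hshift]
          by_cases hb : (l == "") = true
          · rw [if_pos hb, List.getLast?_map, h0]; rfl
          · rw [if_neg hb]
            have hstep : (0 :: (bIdx ls 0).map (· + 1)).getLast? =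
                ((bIdx ls 0).map (· + 1)).getLast? := by
              rcases hm : (bIdx ls 0).map (· + 1) with _ | ⟨a, as⟩
              · exact absurd (by simpa using hm) hne
              · exact List.getLast?_cons_cons
            rw [hstep, List.getLast?_map, h0]; rfl
        have hbody : aTrimBack ls = List.take (J.toNat + 1) ls := by rw [ih', h0]
        have htn : (J + 1).toNat = J.toNat + 1 := by omega
        rw [hlast]
        rcases hx : List.take (J.toNat + 1) ls with _ | ⟨r, rs⟩
        · exact absurd hx htake
        · show (match aTrimBack ls with
            | [] => if PySem.Str.strip l == "" then [] else [l]
            | r :: rs => l :: r :: rs) = List.take ((J + 1).toNat + 1) (l :: ls)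
          rw [hbody, hx, htn, List.take_succ_cons, hx]

-- the list B's slice produces, via head?/getLast? of the index list
def bSpan (ls : List String) : List String :=
  match (bIdx ls 0).head?, (bIdx ls 0).getLast? with
  | some i, some J => PySem.List.slice ls (some i) (some (J + 1))
  | _, _ => []

theorem slice_of_bounds (ls : List String) (a b : Int)
    (h0 : 0 ≤ a) (h1 : a ≤ (ls.length : Int)) (h2 : 0 ≤ b) (h3 : b ≤ (ls.length : Int)) :
    PySem.List.slice ls (some a) (some b) = List.take (b.toNat - a.toNat) (List.drop a.toNat ls) := by
  simp only [PySem.List.slice, PySem.List.clampIdx]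
  rw [if_neg (by omega), if_neg (by omega)]
  have ha : min a.toNat ls.length = a.toNat := by omega
  have hb : min b.toNat ls.length = b.toNat := by omega
  rw [ha, hb]

theorem main_span (ls : List String)
    (hall : ∀ l ∈ ls, (PySem.Str.strip l == "") = (l == "")) :
    aTrimBack (aTrimFront ls) = bSpan ls := by
  induction ls with
  | nil => rfl
  | cons l ls ih =>
      have h := hall l (by simp)
      have hall' : ∀ x ∈ ls, (PySem.Str.strip x == "") = (x == "") :=
        fun x hx => hall x (by simp [hx])
      have hshift := bIdx_shift ls 0
      have hlen : (((l :: ls).length : Nat) : Int) = (ls.length : Int) + 1 := by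
        simp
      by_cases hb : (l == "") = true
      · -- blank first line: A pops it, B's indices all shift by one
        have hfront : aTrimFront (l :: ls) = aTrimFront ls := by
          simp [aTrimFront, h, hb]
        rw [hfront, ih hall']
        unfold bSpan
        rw [bIdx_cons, if_pos hb, hshift]
        rcases hidx : bIdx ls 0 with _ | ⟨i, rest⟩
        · rfl
        · have hne : i :: rest ≠ [] := List.cons_ne_nil i rest
          obtain ⟨J, hJ⟩ : ∃ J, (i :: rest).getLast? = some J :=
            ⟨(i :: rest).getLast hne, List.getLast?_eq_some_getLast hne⟩
          have hib := bIdx_bounds ls 0 i (by rw [hidx]; simp)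
          have hJb := bIdx_bounds ls 0 J (by
            rw [hidx]; exact List.mem_of_getLast? hJ)
          rw [List.head?_map, List.getLast?_map, hJ]
          simp only [List.head?_cons, Option.map_some]
          rw [slice_of_bounds ls i (J + 1) (by omega) (by omega) (by omega) (by omega),
              slice_of_bounds (l :: ls) (i + 1) (J + 1 + 1) (by omega) (by omega) (by omega)
                (by omega)]
          have h1 : (i + 1).toNat = i.toNat + 1 := by omega
          have h2 : (J + 1 + 1).toNat - (i.toNat + 1) = (J + 1).toNat - i.toNat := by omega
          rw [h1, List.drop_succ_cons, h2]
      · -- non-blank first line: A's front loop stops; compare the back trim with the slice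
        have hfront : aTrimFront (l :: ls) = l :: ls := by
          simp [aTrimFront, h, hb]
        rw [hfront, aTrimBack_eq _ hall]
        unfold bSpan
        rcases h0 : (bIdx (l :: ls) 0).getLast? with _ | J
        · have : bIdx (l :: ls) 0 = [] := List.getLast?_eq_none_iff.mp h0
          rw [this]; rfl
        · have hhead : (bIdx (l :: ls) 0).head? = some 0 := by
            rw [bIdx_cons, if_neg hb]; rfl
          have hJb := bIdx_bounds (l :: ls) 0 J (List.mem_of_getLast? h0)
          rw [hhead]
          show List.take (J.toNat + 1) (l :: ls) =
            PySem.List.slice (l :: ls) (some 0) (some (J + 1))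
          rw [slice_of_bounds (l :: ls) 0 (J + 1) (by omega) (by omega) (by omega) (by omega)]
          have : (J + 1).toNat - (0 : Int).toNat = J.toNat + 1 := by omega
          rw [this, Int.toNat_zero, List.drop_zero]

theorem final_eq (ls : List String)
    (hall : ∀ l ∈ ls, (PySem.Str.strip l == "") = (l == "")) :
    PySem.Str.join "\n" (aTrimBack (aTrimFront ls)) =
      (match bIdx ls 0 with
       | [] => ""
       | i :: rest => PySem.Str.join "\n"
           (PySem.List.slice ls (some i) (some ((i :: rest).getLast (List.cons_ne_nil i rest) + 1)))) := by
  rw [main_span ls hall]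
  rcases hidx : bIdx ls 0 with _ | ⟨i, rest⟩
  · unfold bSpan
    rw [hidx]
    rfl
  · unfold bSpan
    rw [hidx]
    simp only [List.head?_cons, List.getLast?_eq_some_getLast (List.cons_ne_nil i rest)]

-- ===== VERDICT (by name: the statement is the Claim_ definition above) =====
theorem clean_doc_text_py_spec : Claim_equal_clean_doc_text_py := by
  intro value _
  show clean_doc_text_py value = clean_doc_text_py_alt value
  by_cases hv : (value == "") = true
  · have : value = "" := by simpa using hv
    subst this; decide
  · unfold clean_doc_text_py clean_doc_text_py_alt
    rw [if_neg hv]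
    exact final_eq ((PySem.Str.splitlines value).map PySem.Str.rstrip)
      (fun l hl => by
        obtain ⟨s, _, rfl⟩ := List.mem_map.mp hl
        exact strip_test_eq s)
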